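-- pv_equiv track=rewrite | github.com/LoveYourself999/LLM_eval | vllm/eval/mtbench101_eval.py | _balanced_subset
-- ===== SOURCE A (Python) =====
-- from typing import Dict, List, Any, Optional
-- from collections import defaultdict, Counter
--
-- def _balanced_subset(items: List[Dict[str, Any]], limit: int) -> List[Dict[str, Any]]:
--     """
--     Take ~balanced sample across tasks rather than first-N lines.
--     Round-robin one item per task until reaching limit.
--     """
--     buckets: Dict[str, List[Dict[str, Any]]] = defaultdict(list)
--     for it in items:
--         t = str(it.get("task") or "UNK")
--         buckets[t].append(it)
--
--     # Stable deterministic order: sort tasks, keep file order within each task bucket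
--     tasks = sorted(buckets.keys())
--     idx = {t: 0 for t in tasks}
--
--     out: List[Dict[str, Any]] = []
--     while len(out) < limit:
--         progressed = False
--         for t in tasks:
--             i = idx[t]
--             if i < len(buckets[t]):
--                 out.append(buckets[t][i])
--                 idx[t] += 1
--                 progressed = True
--                 if len(out) >= limit:
--                     break
--         if not progressed:
--             break  # ran out of data
--     return out
-- ===== SOURCE B (Python) =====
-- from typing import Dict, List, Any
--
--
-- def _balanced_subset(items: List[Dict[str, Any]], limit: int) -> List[Dict[str, Any]]:
--     # Rank-and-sort: tag each item with its occurrence index within its task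
--     # (one counting pass), stable-sort by (rank, task), slice off the first limit.
--     seen: Dict[str, int] = {}
--     keyed = []
--     for it in items:
--         t = str(it.get("task") or "UNK")
--         r = seen.get(t, 0)
--         seen[t] = r + 1
--         keyed.append((r, t, it))
--     keyed.sort(key=lambda x: (x[0], x[1]))
--     return [x[2] for x in keyed[:max(limit, 0)]]
-- ===== Notes on version B (the rewrite author's own statement) =====
-- stated objective: alternative
-- what changed: A's per-task bucket lists driven by a stateful while/for round-robin loop (index dict, progressed flag, early break) are replaced by rank-and-sort: one counting pass tags each item with its occurrence index within its task, a stable sort by the (rank, task) tuple then yields the round-robin order directly, and the first limit items are sliced off.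
import Mathlib
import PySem

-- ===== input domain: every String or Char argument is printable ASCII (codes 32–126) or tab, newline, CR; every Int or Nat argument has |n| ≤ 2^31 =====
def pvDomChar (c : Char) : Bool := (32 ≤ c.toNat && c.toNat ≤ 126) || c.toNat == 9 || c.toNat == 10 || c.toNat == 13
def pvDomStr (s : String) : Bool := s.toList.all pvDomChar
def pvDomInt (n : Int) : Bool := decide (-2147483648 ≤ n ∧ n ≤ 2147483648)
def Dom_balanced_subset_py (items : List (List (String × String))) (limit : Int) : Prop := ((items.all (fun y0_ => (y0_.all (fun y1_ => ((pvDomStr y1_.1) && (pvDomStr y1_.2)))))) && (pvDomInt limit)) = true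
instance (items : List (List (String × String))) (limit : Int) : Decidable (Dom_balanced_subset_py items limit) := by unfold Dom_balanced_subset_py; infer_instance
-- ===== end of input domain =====

-- B replaces A's bucket lists + stateful while/for round-robin loop by rank-and-sort:
-- one counting pass tags every item with its occurrence index within its task, a stable
-- sort by (rank, task) then yields the round-robin order directly; objective: alternative.

-- shared helper: `str(it.get("task") or "UNK")` (identical line in both Pythons)
def pvTask (it : List (String × String)) : String :=
  match (PySem.Dict.mk it).get? "task" with
  | some v => if v = "" then "UNK" else v
  | none => "UNK"

-- ===== PORT A =====
-- A's grouping loop: defaultdict(list) append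
def pvBuckets (items : List (List (String × String))) :
    PySem.Dict String (List (List (String × String))) :=
  items.foldl (fun d it => d.modify (pvTask it) [] (· ++ [it])) PySem.Dict.empty

-- the inner `for t in tasks:` loop; returns (out, idx, progressed); the early
-- `break` (len(out) >= limit) simply stops the recursion and returns
def pvInner (buckets : PySem.Dict String (List (List (String × String)))) (limit : Int) :
    List String → List (List (String × String)) → PySem.Dict String Int → Bool →
    (List (List (String × String)) × PySem.Dict String Int × Bool)
  | [], out, idx, prog => (out, idx, prog)
  | t :: ts, out, idx, prog =>
    let i := idx.getD t 0
    let b := buckets.getD t []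
    if i < (b.length : Int) then
      let out' := out ++ [PySem.List.pyGetD b i []]
      let idx' := idx.insert t (i + 1)
      if limit ≤ (out'.length : Int) then (out', idx', true)
      else pvInner buckets limit ts out' idx' true
    else pvInner buckets limit ts out idx prog

-- the outer `while len(out) < limit:` loop; terminates in ≤ items.length + 1
-- iterations (each one either appends an item or breaks), which is the fuel supplied
def pvWhile (buckets : PySem.Dict String (List (List (String × String)))) (limit : Int)
    (tasks : List String) :
    Nat → List (List (String × String)) → PySem.Dict String Int →
    List (List (String × String))
  | 0, out, _ => out
  | fuel + 1, out, idx =>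
    if ((out.length : Int)) < limit then
      match pvInner buckets limit tasks out idx false with
      | (out', idx', progressed) =>
        if progressed then pvWhile buckets limit tasks fuel out' idx' else out'
    else out

def balanced_subset_py (items : List (List (String × String))) (limit : Int) :
    List (List (String × String)) :=
  let buckets := pvBuckets items
  let tasks := PySem.List.sorted buckets.keys (fun s => s) false
  let idx := tasks.foldl (fun d t => d.insert t (0 : Int)) PySem.Dict.empty
  pvWhile buckets limit tasks (items.length + 1) [] idx

-- ===== PORT B =====
def balanced_subset_py_alt (items : List (List (String × String))) (limit : Int) :
    List (List (String × String)) :=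
  -- one counting pass: seen = {}; keyed.append((seen.get(t,0), t, it)); seen[t] += 1
  let st := items.foldl
    (fun (p : PySem.Dict String Int × List (Int × String × List (String × String))) it =>
      let t := pvTask it
      let r := p.1.getD t 0
      (p.1.insert t (r + 1), p.2 ++ [(r, t, it)]))
    (PySem.Dict.empty, [])
  -- keyed.sort(key=lambda x: (x[0], x[1])) — stable sort on the tuple key
  let sortedK := PySem.List.sorted2 st.2 (fun x => x.1) (fun x => x.2.1) false
  -- [x[2] for x in keyed[:max(limit, 0)]]
  (sortedK.take (max limit 0).toNat).map (fun x => x.2.2)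

-- ===== PRECONDITION & SPEC =====
def Spec_balanced_subset_py (items : List (List (String × String))) (limit : Int) (out : List (List (String × String))) : Prop := out = balanced_subset_py_alt items limit
instance (items : List (List (String × String))) (limit : Int) (out : List (List (String × String))) : Decidable (Spec_balanced_subset_py items limit out) := by unfold Spec_balanced_subset_py; infer_instance

-- ===== CLAIM (what is proved, stated in full; the proofs are below) =====
def Claim_equal_balanced_subset_py : Prop := ∀ (items : List (List (String × String))) (limit : Int), Dom_balanced_subset_py items limit → Spec_balanced_subset_py items limit (balanced_subset_py items limit)

-- ===== LEMMAS AND PROOFS =====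

-- the round-robin schedule, one round at a time, rounds r, r+1, …, r+k-1
def pvRows (cols : List (List (List (String × String)))) : Nat → Nat → List (List (String × String))
  | _, 0 => []
  | r, k + 1 => cols.filterMap (fun c => getElem? c r) ++ pvRows cols (r + 1) k

lemma foldl_max_len_ge {α : Type} (cols : List (List α)) :
    ∀ (a : Nat), (∀ c ∈ cols, c.length ≤ cols.foldl (fun m c => max m c.length) a) ∧ a ≤ cols.foldl (fun m c => max m c.length) a := by
  induction cols with
  | nil => intro a; simp
  | cons c cs ih =>
    intro a
    refine ⟨?_, le_trans (le_max_left a c.length) (ih (max a c.length)).2⟩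
    intro c' hc'
    rcases List.mem_cons.1 hc' with h | h
    · subst h; exact le_trans (le_max_right a c'.length) (ih (max a c'.length)).2
    · exact (ih (max a c.length)).1 c' h

lemma foldl_max_len_le {α : Type} (cols : List (List α)) :
    ∀ (a m : Nat), a ≤ m → (∀ c ∈ cols, c.length ≤ m) →
    cols.foldl (fun m c => max m c.length) a ≤ m := by
  induction cols with
  | nil => intro a m ha _; simpa
  | cons c cs ih =>
    intro a m ha h
    exact ih _ m (by simp [ha, h c (by simp)]) (fun c' hc' => h c' (by simp [hc']))

lemma row_ne_nil_lt {α : Type} (cols : List (List α)) (r : Nat)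
    (h : cols.filterMap (fun c => getElem? c r) ≠ []) : ∃ c ∈ cols, r < c.length := by
  rcases List.exists_mem_of_ne_nil _ h with ⟨x, hx⟩
  rcases (List.mem_filterMap).1 hx with ⟨c, hc, hg⟩
  exact ⟨c, hc, List.getElem?_eq_some_iff.1 hg |>.choose⟩

lemma getD_foldl_insert_zero (l : List String) (e : PySem.Dict String Int) (t : String) :
    (l.foldl (fun d t => d.insert t (0 : Int)) e).getD t 0 = if t ∈ l then 0 else e.getD t 0 := by
  induction l generalizing e with
  | nil => simp
  | cons s ss ih =>
    simp only [List.foldl_cons, ih, List.mem_cons]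
    by_cases h : t ∈ ss
    · simp [h]
    · by_cases h2 : t = s
      · simp [h2, PySem.Dict.getD_insert_self]
      · simp [h, h2, PySem.Dict.getD_insert]

lemma bucket_eq_filter (items : List (List (String × String))) (t : String) :
    (pvBuckets items).getD t [] = items.filter (fun it => pvTask it == t) := by
  have : pvBuckets items
      = (items.map (fun it => (pvTask it, it))).foldl (fun d p => d.modify p.1 [] (· ++ [p.2])) PySem.Dict.empty := by
    rw [pvBuckets, List.foldl_map]
  rw [this, PySem.Dict.getD_foldl_modify_append]
  rw [List.filter_map]
  simp [List.map_map, Function.comp_def]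

lemma bucket_len_le (items : List (List (String × String))) (t : String) :
    ((pvBuckets items).getD t []).length ≤ items.length := by
  rw [bucket_eq_filter]
  exact List.length_filter_le _ _

lemma keys_buckets_nodup (items : List (List (String × String))) :
    (pvBuckets items).keys.Nodup := by
  rw [pvBuckets]
  exact PySem.Dict.nodup_keys_foldl_modify_key items pvTask [] (fun d x => (· ++ [x])) PySem.Dict.empty (by simp)

lemma pvInner_no_break (d : PySem.Dict String (List (List (String × String)))) (limit : Int)
    (r : Nat) :
    ∀ (TS : List String) (out : List (List (String × String)))
      (idx : PySem.Dict String Int) (g : Bool),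
      TS.Nodup →
      (∀ t ∈ TS, idx.getD t 0 = ((min r (d.getD t []).length : Nat) : Int)) →
      (((TS.map (fun t => d.getD t [])).filterMap (fun c => getElem? c r)).length : Int) < limit - out.length →
      ∃ idx',
        pvInner d limit TS out idx g =
          (out ++ (TS.map (fun t => d.getD t [])).filterMap (fun c => getElem? c r), idx',
            g || !((TS.map (fun t => d.getD t [])).filterMap (fun c => getElem? c r)).isEmpty) ∧
        ∀ t', idx'.getD t' 0 =
          if t' ∈ TS ∧ r < (d.getD t' []).length then ((r : Int) + 1) else idx.getD t' 0 := by
  intro TS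
  induction TS with
  | nil =>
    intro out idx g _ _ _
    exact ⟨idx, by simp [pvInner], by simp⟩
  | cons t ts ih =>
    intro out idx g hnd hinv hlen
    have hts : ts.Nodup := (List.nodup_cons.1 hnd).2
    have htni : t ∉ ts := (List.nodup_cons.1 hnd).1
    have hit : idx.getD t 0 = ((min r (d.getD t []).length : Nat) : Int) := hinv t (by simp)
    by_cases hr : r < (d.getD t []).length
    · -- the head task contributes its r-th element
      have hmin : min r (d.getD t []).length = r := Nat.min_eq_left (le_of_lt hr)
      have hrow : (((t :: ts).map (fun t => d.getD t [])).filterMap (fun c => getElem? c r))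
          = (d.getD t [])[r] :: ((ts.map (fun t => d.getD t [])).filterMap (fun c => getElem? c r)) := by
        simp [List.getElem?_eq_getElem hr]
      have hcond : idx.getD t 0 < ((d.getD t []).length : Int) := by
        rw [hit, hmin]; exact_mod_cast hr
      have hget : PySem.List.pyGetD (d.getD t []) (idx.getD t 0) [] = (d.getD t [])[r] := by
        rw [hit, hmin, PySem.List.pyGetD_natCast, List.getD_eq_getElem?_getD,
          List.getElem?_eq_getElem hr]
        rfl
      have hlcons : (out ++ [PySem.List.pyGetD (d.getD t []) (idx.getD t 0) []]).length = out.length + 1 := by simp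
      have hnobrk : ¬ (limit ≤ ((out ++ [PySem.List.pyGetD (d.getD t []) (idx.getD t 0) []]).length : Int)) := by
        rw [hrow] at hlen
        rw [hlcons]
        simp only [List.length_cons] at hlen
        push_cast at hlen ⊢
        omega
      have hinv' : ∀ t' ∈ ts, (idx.insert t (idx.getD t 0 + 1)).getD t' 0
          = ((min r (d.getD t' []).length : Nat) : Int) := by
        intro t' ht'
        rw [PySem.Dict.getD_insert, if_neg (by rintro rfl; exact htni ht')]
        exact hinv t' (by simp [ht'])
      have hlen' : (((ts.map (fun t => d.getD t [])).filterMap (fun c => getElem? c r)).length : Int)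
          < limit - ((out ++ [PySem.List.pyGetD (d.getD t []) (idx.getD t 0) []]).length : Int) := by
        rw [hrow] at hlen
        rw [hlcons]
        simp only [List.length_cons] at hlen
        push_cast at hlen ⊢
        omega
      obtain ⟨idx', heq, hchar⟩ :=
        ih (out ++ [PySem.List.pyGetD (d.getD t []) (idx.getD t 0) []])
          (idx.insert t (idx.getD t 0 + 1)) true hts hinv' hlen'
      refine ⟨idx', ?_, ?_⟩
      · show pvInner d limit (t :: ts) out idx g = _
        rw [pvInner]
        simp only [if_pos hcond, if_neg hnobrk, heq, hrow]
        simp [hget]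
      · intro t'
        rw [hchar t']
        by_cases het : t' = t
        · subst het
          have h1 : ¬ (t' ∈ ts ∧ r < (d.getD t' []).length) := fun h => htni h.1
          have h2 : t' ∈ t' :: ts ∧ r < (d.getD t' []).length := ⟨by simp, hr⟩
          rw [if_neg h1, if_pos h2, PySem.Dict.getD_insert, if_pos rfl, hit, hmin]
        · by_cases hmem : t' ∈ ts ∧ r < (d.getD t' []).length
          · have h2 : t' ∈ t :: ts ∧ r < (d.getD t' []).length := ⟨by simp [hmem.1], hmem.2⟩
            rw [if_pos hmem, if_pos h2]
          · have h2 : ¬ (t' ∈ t :: ts ∧ r < (d.getD t' []).length) := by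
              rintro ⟨h1, h2⟩
              rcases List.mem_cons.1 h1 with h | h
              · exact het h
              · exact hmem ⟨h, h2⟩
            rw [if_neg hmem, if_neg h2, PySem.Dict.getD_insert, if_neg het]
    · -- head task is exhausted: skipped
      have hmin : min r (d.getD t []).length = (d.getD t []).length := Nat.min_eq_right (by omega)
      have hrow : (((t :: ts).map (fun t => d.getD t [])).filterMap (fun c => getElem? c r))
          = ((ts.map (fun t => d.getD t [])).filterMap (fun c => getElem? c r)) := by
        have hnone : (d.getD t [])[r]? = none := List.getElem?_eq_none_iff.2 (by omega)
        simp [hnone]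
      have hcond : ¬ (idx.getD t 0 < ((d.getD t []).length : Int)) := by
        rw [hit, hmin]; simp
      obtain ⟨idx', heq, hchar⟩ := ih out idx g hts
        (fun t' ht' => hinv t' (by simp [ht'])) (by rw [hrow] at hlen; exact hlen)
      refine ⟨idx', ?_, ?_⟩
      · show pvInner d limit (t :: ts) out idx g = _
        rw [pvInner]
        simp only [if_neg hcond, heq, hrow]
      · intro t'
        rw [hchar t']
        by_cases het : t' = t
        · subst het
          have h1 : ¬ (t' ∈ ts ∧ r < (d.getD t' []).length) := fun h => htni h.1
          have h2 : ¬ (t' ∈ t' :: ts ∧ r < (d.getD t' []).length) := fun h => hr h.2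
          rw [if_neg h1, if_neg h2]
        · by_cases hmem : t' ∈ ts ∧ r < (d.getD t' []).length
          · have h2 : t' ∈ t :: ts ∧ r < (d.getD t' []).length := ⟨by simp [hmem.1], hmem.2⟩
            rw [if_pos hmem, if_pos h2]
          · have h2 : ¬ (t' ∈ t :: ts ∧ r < (d.getD t' []).length) := by
              rintro ⟨h1, h2⟩
              rcases List.mem_cons.1 h1 with h | h
              · exact het h
              · exact hmem ⟨h, h2⟩
            rw [if_neg hmem, if_neg h2]

lemma pvInner_break (d : PySem.Dict String (List (List (String × String)))) (limit : Int)
    (r : Nat) :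
    ∀ (TS : List String) (out : List (List (String × String)))
      (idx : PySem.Dict String Int) (g : Bool),
      TS.Nodup →
      (∀ t ∈ TS, idx.getD t 0 = ((min r (d.getD t []).length : Nat) : Int)) →
      1 ≤ limit - out.length →
      limit - out.length ≤ (((TS.map (fun t => d.getD t [])).filterMap (fun c => getElem? c r)).length : Int) →
      ∃ idx',
        pvInner d limit TS out idx g =
          (out ++ ((TS.map (fun t => d.getD t [])).filterMap (fun c => getElem? c r)).take (limit - out.length).toNat,
            idx', true) := by
  intro TS
  induction TS with
  | nil =>
    intro out idx g _ _ h1 h2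
    simp only [List.map_nil, List.filterMap_nil, List.length_nil] at h2
    omega
  | cons t ts ih =>
    intro out idx g hnd hinv h1 h2
    have hts : ts.Nodup := (List.nodup_cons.1 hnd).2
    have htni : t ∉ ts := (List.nodup_cons.1 hnd).1
    have hit : idx.getD t 0 = ((min r (d.getD t []).length : Nat) : Int) := hinv t (by simp)
    by_cases hr : r < (d.getD t []).length
    · have hmin : min r (d.getD t []).length = r := Nat.min_eq_left (le_of_lt hr)
      have hrow : (((t :: ts).map (fun t => d.getD t [])).filterMap (fun c => getElem? c r))
          = (d.getD t [])[r] :: ((ts.map (fun t => d.getD t [])).filterMap (fun c => getElem? c r)) := by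
        simp [List.getElem?_eq_getElem hr]
      have hcond : idx.getD t 0 < ((d.getD t []).length : Int) := by
        rw [hit, hmin]; exact_mod_cast hr
      have hget : PySem.List.pyGetD (d.getD t []) (idx.getD t 0) [] = (d.getD t [])[r] := by
        rw [hit, hmin, PySem.List.pyGetD_natCast, List.getD_eq_getElem?_getD,
          List.getElem?_eq_getElem hr]
        rfl
      have hlcons : (out ++ [PySem.List.pyGetD (d.getD t []) (idx.getD t 0) []]).length = out.length + 1 := by simp
      by_cases hbrk : limit ≤ ((out.length : Int) + 1)
      · -- this append reaches the limit: the Python `break`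
        refine ⟨idx.insert t (idx.getD t 0 + 1), ?_⟩
        rw [pvInner]
        simp only [if_pos hcond]
        rw [if_pos (by rw [hlcons]; push_cast; exact hbrk)]
        have hn1 : (limit - (out.length : Int)).toNat = 1 := by omega
        rw [hrow, hn1, List.take_succ_cons, List.take_zero, hget]
      · -- not yet: recurse into the tail with one more item taken
        have hinv' : ∀ t' ∈ ts, (idx.insert t (idx.getD t 0 + 1)).getD t' 0
            = ((min r (d.getD t' []).length : Nat) : Int) := by
          intro t' ht'
          rw [PySem.Dict.getD_insert, if_neg (by rintro rfl; exact htni ht')]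
          exact hinv t' (by simp [ht'])
        have h1' : 1 ≤ limit - ((out ++ [PySem.List.pyGetD (d.getD t []) (idx.getD t 0) []]).length : Int) := by
          rw [hlcons]; push_cast; omega
        have h2' : limit - ((out ++ [PySem.List.pyGetD (d.getD t []) (idx.getD t 0) []]).length : Int)
            ≤ (((ts.map (fun t => d.getD t [])).filterMap (fun c => getElem? c r)).length : Int) := by
          rw [hrow] at h2
          rw [hlcons]
          simp only [List.length_cons] at h2
          push_cast at h2 ⊢
          omega
        obtain ⟨idx', heq⟩ :=
          ih (out ++ [PySem.List.pyGetD (d.getD t []) (idx.getD t 0) []])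
            (idx.insert t (idx.getD t 0 + 1)) true hts hinv' h1' h2'
        refine ⟨idx', ?_⟩
        rw [pvInner]
        simp only [if_pos hcond]
        rw [if_neg (by rw [hlcons]; push_cast; exact hbrk), heq, hrow]
        have hnt : (limit - (out.length : Int)).toNat
            = (limit - ((out ++ [PySem.List.pyGetD (d.getD t []) (idx.getD t 0) []]).length : Int)).toNat + 1 := by
          rw [hlcons]; push_cast; omega
        rw [hnt, List.take_succ_cons, hget]
        simp
    · have hmin : min r (d.getD t []).length = (d.getD t []).length := Nat.min_eq_right (by omega)
      have hnone : (d.getD t [])[r]? = none := List.getElem?_eq_none_iff.2 (by omega)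
      have hrow : (((t :: ts).map (fun t => d.getD t [])).filterMap (fun c => getElem? c r))
          = ((ts.map (fun t => d.getD t [])).filterMap (fun c => getElem? c r)) := by
        simp [hnone]
      have hcond : ¬ (idx.getD t 0 < ((d.getD t []).length : Int)) := by
        rw [hit, hmin]; simp
      obtain ⟨idx', heq⟩ := ih out idx g hts
        (fun t' ht' => hinv t' (by simp [ht'])) h1 (by rw [hrow] at h2; exact h2)
      refine ⟨idx', ?_⟩
      rw [pvInner]
      simp only [if_neg hcond, heq, hrow]

-- the outer while loop computes: out ++ (rounds r.. of the schedule, cut at limit)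
lemma pvWhile_eq (d : PySem.Dict String (List (List (String × String)))) (limit : Int)
    (T : List String) (hT : T.Nodup) :
    ∀ (fuel : Nat) (r : Nat) (out : List (List (String × String)))
      (idx : PySem.Dict String Int),
      (∀ t ∈ T, idx.getD t 0 = ((min r (d.getD t []).length : Nat) : Int)) →
      (T.map (fun t => d.getD t [])).foldl (fun m c => max m c.length) 0 - r < fuel →
      pvWhile d limit T fuel out idx =
        out ++ (pvRows (T.map (fun t => d.getD t []))
                  r ((T.map (fun t => d.getD t [])).foldl (fun m c => max m c.length) 0 - r)).take
                (limit - out.length).toNat := by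
  intro fuel
  induction fuel with
  | zero => intro r out idx _ hfuel; omega
  | succ fuel ih =>
    intro r out idx hinv hfuel
    by_cases hout : ((out.length : Int)) < limit
    · by_cases hbig :
        (((T.map (fun t => d.getD t [])).filterMap (fun c => getElem? c r)).length : Int)
          < limit - out.length
      · -- the whole row r fits below the limit
        obtain ⟨idx', heq, hchar⟩ := pvInner_no_break d limit r T out idx false hT hinv hbig
        rw [pvWhile, if_pos hout, heq]
        by_cases hemp : ((T.map (fun t => d.getD t [])).filterMap (fun c => getElem? c r)) = []
        · -- empty row: no task made progress, the loop ends
          have hle : (T.map (fun t => d.getD t [])).foldl (fun m c => max m c.length) 0 ≤ r := by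
            apply foldl_max_len_le _ 0 r (Nat.zero_le r)
            intro c hc
            by_contra hlt
            rcases List.filterMap_eq_nil_iff.1 hemp c hc with hnone
            exact hlt (by
              by_contra hge
              exact absurd hnone (by simp at *; omega))
          have h0 : (T.map (fun t => d.getD t [])).foldl (fun m c => max m c.length) 0 - r = 0 := by omega
          simp [hemp, h0, pvRows]
        · -- nonempty row: append it and continue with round r+1
          have hemp' : ((T.map (fun t => d.getD t [])).filterMap (fun c => getElem? c r)).isEmpty = false := by
            simpa [List.isEmpty_iff] using hemp
          obtain ⟨c, hc, hlt⟩ := row_ne_nil_lt _ r hemp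
          have hrlt : r < (T.map (fun t => d.getD t [])).foldl (fun m c => max m c.length) 0 :=
            lt_of_lt_of_le hlt ((foldl_max_len_ge _ 0).1 c hc)
          have hinv' : ∀ t ∈ T, idx'.getD t 0 = ((min (r + 1) (d.getD t []).length : Nat) : Int) := by
            intro t ht
            rw [hchar t]
            by_cases h : r < (d.getD t []).length
            · rw [if_pos ⟨ht, h⟩, Nat.min_eq_left (by omega)]
              push_cast; ring
            · rw [if_neg (by tauto), hinv t ht]
              have : min r (d.getD t []).length = min (r + 1) (d.getD t []).length := by omega
              rw [this]
          dsimp only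
          rw [hemp']
          simp only [Bool.not_false, Bool.false_or, reduceIte]
          rw [ih (r + 1) _ idx' hinv' (by omega)]
          have hsplit : (T.map (fun t => d.getD t [])).foldl (fun m c => max m c.length) 0 - r
              = ((T.map (fun t => d.getD t [])).foldl (fun m c => max m c.length) 0 - (r + 1)) + 1 := by omega
          rw [hsplit]
          show _ = out ++ (pvRows _ r (_ + 1)).take _
          rw [pvRows]
          rw [List.take_append]
          have htk : ((T.map (fun t => d.getD t [])).filterMap (fun c => getElem? c r)).take
              (limit - (out.length : Int)).toNat
              = ((T.map (fun t => d.getD t [])).filterMap (fun c => getElem? c r)) :=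
            List.take_of_length_le (by omega)
          rw [htk, List.append_assoc]
          congr 2
          have hlen2 : (out ++ (T.map (fun t => d.getD t [])).filterMap (fun c => getElem? c r)).length
              = out.length + ((T.map (fun t => d.getD t [])).filterMap (fun c => getElem? c r)).length := by
            simp
          rw [hlen2]
          congr 1
          push_cast
          omega
      · -- row r reaches the limit: the inner break fires and the loop stops
        rw [not_lt] at hbig
        obtain ⟨idx', heq⟩ := pvInner_break d limit r T out idx false hT hinv (by omega) hbig
        rw [pvWhile, if_pos hout, heq]
        dsimp only
        simp only [reduceIte]
        have hrne : ((T.map (fun t => d.getD t [])).filterMap (fun c => getElem? c r)) ≠ [] := by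
          intro h
          rw [h] at hbig
          simp at hbig
          omega
        obtain ⟨c, hc, hlt⟩ := row_ne_nil_lt _ r hrne
        have hrlt : r < (T.map (fun t => d.getD t [])).foldl (fun m c => max m c.length) 0 :=
          lt_of_lt_of_le hlt ((foldl_max_len_ge _ 0).1 c hc)
        have hfpos : 1 ≤ fuel := by omega
        obtain ⟨f, rfl⟩ : ∃ f, fuel = f + 1 := ⟨fuel - 1, by omega⟩
        have hlentk : ((((T.map (fun t => d.getD t [])).filterMap (fun c => getElem? c r)).take
            (limit - (out.length : Int)).toNat).length) = (limit - (out.length : Int)).toNat := by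
          rw [List.length_take]
          omega
        rw [pvWhile]
        rw [if_neg (by
          rw [List.length_append, hlentk]
          push_cast
          omega)]
        have hsplit : (T.map (fun t => d.getD t [])).foldl (fun m c => max m c.length) 0 - r
            = ((T.map (fun t => d.getD t [])).foldl (fun m c => max m c.length) 0 - (r + 1)) + 1 := by omega
        rw [hsplit, pvRows, List.take_append]
        have h0 : ((limit - (out.length : Int)).toNat
            - ((T.map (fun t => d.getD t [])).filterMap (fun c => getElem? c r)).length) = 0 := by omega
        rw [h0]
        simp
    · -- len(out) ≥ limit: the while condition fails at once
      have h0 : (limit - (out.length : Int)).toNat = 0 := by omega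
      rw [pvWhile, if_neg hout, h0]
      simp

lemma cols_len_le (items : List (List (String × String))) (c : List (List (String × String)))
    (hc : c ∈ (PySem.List.sorted (pvBuckets items).keys (fun s => s) false).map
      (fun t => (pvBuckets items).getD t [])) : c.length ≤ items.length := by
  rcases List.mem_map.1 hc with ⟨t, _, rfl⟩
  exact bucket_len_le items t

-- ===== B-side lemmas: rank-and-sort = round-robin schedule =====

-- the counting pass, with the counter dict replaced by a pure count function
def pvBump (f : String → Int) (u : String) : String → Int :=
  fun t => if t = u then f t + 1 else f t

def pvKeyed (f : String → Int) : List (List (String × String)) → List (Int × String × List (String × String))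
  | [] => []
  | it :: rest => (f (pvTask it), pvTask it, it) :: pvKeyed (pvBump f (pvTask it)) rest

-- the keyed round-robin schedule, rounds r, r+1, …, r+k-1
def pvKRows (T : List String) (B : String → List (List (String × String))) :
    Nat → Nat → List (Int × String × List (String × String))
  | _, 0 => []
  | r, k + 1 =>
    T.filterMap (fun t => ((B t)[r]?).map (fun y => ((r : Int), t, y))) ++ pvKRows T B (r + 1) k

-- Python's tuple key (rank, task) as a lexicographic key
def pvKey (x : Int × String × List (String × String)) : Lex (Int × String) := toLex (x.1, x.2.1)

lemma keyed_fold_eq (items : List (List (String × String))) :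
    ∀ (d : PySem.Dict String Int) (acc : List (Int × String × List (String × String))),
      (items.foldl
        (fun (p : PySem.Dict String Int × List (Int × String × List (String × String))) it =>
          let t := pvTask it
          let r := p.1.getD t 0
          (p.1.insert t (r + 1), p.2 ++ [(r, t, it)])) (d, acc)).2
      = acc ++ pvKeyed (fun t => d.getD t 0) items := by
  induction items with
  | nil => intro d acc; simp [pvKeyed]
  | cons it rest ih =>
    intro d acc
    simp only [List.foldl_cons]
    rw [ih]
    have hf : (fun t => (d.insert (pvTask it) (d.getD (pvTask it) 0 + 1)).getD t 0)
        = pvBump (fun t => d.getD t 0) (pvTask it) := by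
      funext t
      rw [PySem.Dict.getD_insert, pvBump]
      by_cases h : t = pvTask it
      · simp [h]
      · simp [h]
    rw [hf, pvKeyed]
    simp

lemma mem_pvKeyed (items : List (List (String × String))) :
    ∀ (f : String → Int) (x : Int × String × List (String × String)),
      x ∈ pvKeyed f items ↔
        ∃ (t : String) (j : Nat) (y : List (String × String)), x = (f t + (j : Int), t, y) ∧
          (items.filter (fun it => pvTask it == t))[j]? = some y := by
  induction items with
  | nil =>
    intro f x
    simp [pvKeyed]
  | cons it rest ih =>
    intro f x
    rw [pvKeyed, List.mem_cons, ih]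
    constructor
    · rintro (rfl | ⟨t, j, y, rfl, hj⟩)
      · refine ⟨pvTask it, 0, it, by simp, ?_⟩
        rw [List.filter_cons, if_pos (by simp)]
        simp
      · by_cases h : t = pvTask it
        · refine ⟨t, j + 1, y, ?_, ?_⟩
          · have hb : pvBump f (pvTask it) t = f t + 1 := by simp [pvBump, h]
            rw [hb]
            push_cast
            ring_nf
          · rw [List.filter_cons, if_pos (by simp [h])]
            simpa using hj
        · refine ⟨t, j, y, ?_, ?_⟩
          · have hb : pvBump f (pvTask it) t = f t := by simp [pvBump, h]
            rw [hb]
          · rw [List.filter_cons, if_neg (by simp only [beq_iff_eq]; exact fun he => h he.symm)]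
            exact hj
    · rintro ⟨t, j, y, hx, hj⟩
      by_cases h : t = pvTask it
      · rw [List.filter_cons, if_pos (by simp [h])] at hj
        match j, hj with
        | 0, hj =>
          left
          obtain rfl : it = y := by simpa using hj
          rw [hx]
          simp [h]
        | j + 1, hj =>
          right
          refine ⟨t, j, y, ?_, by simpa using hj⟩
          have hb : pvBump f (pvTask it) t = f t + 1 := by simp [pvBump, h]
          rw [hx, hb]
          push_cast
          ring_nf
      · rw [List.filter_cons, if_neg (by simp only [beq_iff_eq]; exact fun he => h he.symm)] at hj
        right
        refine ⟨t, j, y, ?_, hj⟩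
        have hb : pvBump f (pvTask it) t = f t := by simp [pvBump, h]
        rw [hx, hb]

lemma nodup_pvKeyed (items : List (List (String × String))) :
    ∀ (f : String → Int), (pvKeyed f items).Nodup := by
  induction items with
  | nil => intro f; simp [pvKeyed]
  | cons it rest ih =>
    intro f
    rw [pvKeyed, List.nodup_cons]
    refine ⟨?_, ih _⟩
    intro hmem
    rcases (mem_pvKeyed rest _ _).1 hmem with ⟨t, j, y, heq, _⟩
    have h1 : f (pvTask it) = pvBump f (pvTask it) t + (j : Int) := congrArg Prod.fst heq
    have h2 : pvTask it = t := congrArg (Prod.fst ∘ Prod.snd) heq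
    subst h2
    have hb : pvBump f (pvTask it) (pvTask it) = f (pvTask it) + 1 := by simp [pvBump]
    rw [hb] at h1
    omega

lemma mem_pvKRows (T : List String) (B : String → List (List (String × String))) :
    ∀ (k r : Nat) (x : Int × String × List (String × String)),
      x ∈ pvKRows T B r k ↔
        ∃ (r' : Nat) (t : String) (y : List (String × String)), r ≤ r' ∧ r' < r + k ∧ t ∈ T ∧ (B t)[r']? = some y ∧
          x = ((r' : Int), t, y) := by
  intro k
  induction k with
  | zero => intro r x; simp [pvKRows]; omega
  | succ k ih =>
    intro r x
    rw [pvKRows, List.mem_append, ih, List.mem_filterMap]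
    constructor
    · rintro (⟨t, ht, hx⟩ | ⟨r', t, y, h1, h2, h3, h4, rfl⟩)
      · rcases Option.map_eq_some_iff.1 hx with ⟨y, hy, rfl⟩
        exact ⟨r, t, y, le_refl r, by omega, ht, hy, rfl⟩
      · exact ⟨r', t, y, by omega, by omega, h3, h4, rfl⟩
    · rintro ⟨r', t, y, h1, h2, h3, h4, rfl⟩
      by_cases h : r' = r
      · subst h
        exact Or.inl ⟨t, h3, by rw [h4]; rfl⟩
      · exact Or.inr ⟨r', t, y, by omega, by omega, h3, h4, rfl⟩

lemma pairwise_pvKRows (T : List String) (B : String → List (List (String × String)))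
    (hT : T.Pairwise (· < ·)) :
    ∀ (k r : Nat), (pvKRows T B r k).Pairwise (fun a b => pvKey a < pvKey b) := by
  intro k
  induction k with
  | zero => intro r; simp [pvKRows]
  | succ k ih =>
    intro r
    rw [pvKRows, List.pairwise_append]
    refine ⟨?_, ih (r + 1), ?_⟩
    · rw [List.pairwise_filterMap]
      refine hT.imp_of_mem ?_
      intro a b ha hb hab x hx y hy
      rcases Option.map_eq_some_iff.1 hx with ⟨u, _, rfl⟩
      rcases Option.map_eq_some_iff.1 hy with ⟨v, _, rfl⟩
      show toLex ((r : Int), a) < toLex ((r : Int), b)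
      exact Prod.Lex.toLex_lt_toLex.2 (Or.inr ⟨rfl, hab⟩)
    · intro x hx y hy
      rcases List.mem_filterMap.1 hx with ⟨t, _, hm⟩
      rcases Option.map_eq_some_iff.1 hm with ⟨u, _, rfl⟩
      rcases (mem_pvKRows T B k (r + 1) y).1 hy with ⟨r', t', y', h1, _, _, _, rfl⟩
      show toLex ((r : Int), t) < toLex ((r' : Int), t')
      exact Prod.Lex.toLex_lt_toLex.2 (Or.inl (by omega))

-- Python's stable sort on the tuple key (x[0], x[1]) is the sort by the lexicographic key
lemma sorted2_eq_sorted_lex (xs : List (Int × String × List (String × String))) :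
    PySem.List.sorted2 xs (fun x => x.1) (fun x => x.2.1) false
      = PySem.List.sorted xs pvKey false := by
  rw [PySem.List.sorted2, PySem.List.sorted]
  simp only [if_neg (by decide : ¬ (false = true))]
  congr 1
  funext acc x
  congr 1
  funext a b
  show (decide (a.1 < b.1) || (!decide (b.1 < a.1) && decide (a.2.1 < b.2.1)))
      = decide (pvKey a < pvKey b)
  have hlex : pvKey a < pvKey b ↔ a.1 < b.1 ∨ (a.1 = b.1 ∧ a.2.1 < b.2.1) := by
    rw [pvKey, pvKey, Prod.Lex.toLex_lt_toLex]
  rw [show decide (pvKey a < pvKey b)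
      = decide (a.1 < b.1 ∨ (a.1 = b.1 ∧ a.2.1 < b.2.1)) from decide_eq_decide.mpr hlex]
  rcases lt_trichotomy a.1 b.1 with h | h | h
  · simp [h, asymm h]
  · simp [h]
  · simp [h, asymm h, ne_of_gt h]

-- projecting the keyed schedule gives the plain schedule
lemma map_pvKRows (T : List String) (B : String → List (List (String × String))) :
    ∀ (k r : Nat),
      (pvKRows T B r k).map (fun x => x.2.2) = pvRows (T.map B) r k := by
  intro k
  induction k with
  | zero => intro r; simp [pvKRows, pvRows]
  | succ k ih =>
    intro r
    rw [pvKRows, pvRows, List.map_append, ih, List.filterMap_map, List.map_filterMap]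
    congr 1
    apply List.filterMap_congr
    intro t _
    cases h : (B t)[r]? <;> simp [h, Function.comp]

-- ===== VERDICT (by name: the statement is the Claim_ definition above) =====
theorem balanced_subset_py_spec : Claim_equal_balanced_subset_py := by
  intro items limit _
  show balanced_subset_py items limit = balanced_subset_py_alt items limit
  simp only [balanced_subset_py, balanced_subset_py_alt]
  have hndk : (pvBuckets items).keys.Nodup := keys_buckets_nodup items
  have hT : (PySem.List.sorted (pvBuckets items).keys (fun s => s) false).Nodup :=
    ((PySem.List.sorted_perm _ _ _).nodup_iff).2 hndk
  have hinv0 : ∀ t ∈ PySem.List.sorted (pvBuckets items).keys (fun s => s) false,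
      ((PySem.List.sorted (pvBuckets items).keys (fun s => s) false).foldl
        (fun d t => d.insert t (0 : Int)) PySem.Dict.empty).getD t 0
      = ((min 0 ((pvBuckets items).getD t []).length : Nat) : Int) := by
    intro t ht
    rw [getD_foldl_insert_zero, if_pos ht]
    simp
  have hfuel : ((PySem.List.sorted (pvBuckets items).keys (fun s => s) false).map
      (fun t => (pvBuckets items).getD t [])).foldl (fun m c => max m c.length) 0 - 0
      < items.length + 1 := by
    have := foldl_max_len_le ((PySem.List.sorted (pvBuckets items).keys (fun s => s) false).map
      (fun t => (pvBuckets items).getD t [])) 0 items.length (Nat.zero_le _)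
      (cols_len_le items)
    omega
  rw [pvWhile_eq (pvBuckets items) limit _ hT (items.length + 1) 0 [] _ hinv0 hfuel]
  -- abbreviations
  set T := PySem.List.sorted (pvBuckets items).keys (fun s => s) false with hTdef
  set Bk : String → List (List (String × String)) := fun t => (pvBuckets items).getD t [] with hBk
  set rounds := (T.map Bk).foldl (fun m c => max m c.length) 0 with hrounds
  -- the B side: fold = pvKeyed, sort = pvKRows
  rw [keyed_fold_eq items PySem.Dict.empty []]
  have hf0 : (fun t => (PySem.Dict.empty : PySem.Dict String Int).getD t 0) = fun _ => (0 : Int) := by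
    funext t; simp
  rw [hf0]
  simp only [List.nil_append]
  rw [sorted2_eq_sorted_lex]
  -- T is strictly increasing
  have hTpw : T.Pairwise (· < ·) := by
    have hle : T.Pairwise (fun a b => a ≤ b) :=
      PySem.List.sorted_pairwise (pvBuckets items).keys (fun s => s)
    have := List.Pairwise.and hle hT
    exact this.imp (fun h => lt_of_le_of_ne h.1 h.2)
  -- membership equivalence between keyed items and the keyed schedule
  have hmemeq : ∀ x, x ∈ pvKRows T Bk 0 rounds ↔ x ∈ pvKeyed (fun _ => (0 : Int)) items := by
    intro x
    rw [mem_pvKRows, mem_pvKeyed]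
    constructor
    · rintro ⟨r', t, y, _, _, _, hy, rfl⟩
      refine ⟨t, r', y, by simp, ?_⟩
      have hy' : (((pvBuckets items).getD t []))[r']? = some y := by
        simpa only [hBk] using hy
      rw [bucket_eq_filter] at hy'
      exact hy'
    · rintro ⟨t, j, y, rfl, hj⟩
      have hb : (Bk t)[j]? = some y := by
        simp only [hBk]
        rw [bucket_eq_filter]
        exact hj
      have hjlt : j < (Bk t).length := (List.getElem?_eq_some_iff.1 hb).choose
      have htmem : t ∈ T := by
        have hyb : y ∈ Bk t := List.mem_of_getElem? hb
        have : ∃ it ∈ items, pvTask it = t := by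
          simp only [hBk] at hyb
          rw [bucket_eq_filter] at hyb
          rcases List.mem_filter.1 hyb with ⟨hmem, hbeq⟩
          exact ⟨y, hmem, by simpa using hbeq⟩
        rcases this with ⟨it, hit, rfl⟩
        rw [hTdef, PySem.List.mem_sorted]
        rw [pvBuckets, PySem.Dict.keys_foldl_modify_key]
        have : PySem.Set.update (PySem.Dict.empty : PySem.Dict String (List (List (String × String)))).keys (items.map pvTask) = PySem.Set.ofList (items.map pvTask) := by
          simp [PySem.Set.update, PySem.Set.ofList_eq_foldl]
        rw [this, PySem.Set.mem_ofList]
        exact List.mem_map_of_mem hit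
      have hrd : j < rounds := by
        have h1 : (Bk t).length ≤ rounds :=
          (foldl_max_len_ge (T.map Bk) 0).1 (Bk t) (List.mem_map_of_mem htmem)
        omega
      exact ⟨j, t, y, Nat.zero_le j, by omega, htmem, hb, by simp⟩
  -- sorted keyed = keyed schedule
  have hpw : (pvKRows T Bk 0 rounds).Pairwise (fun a b => pvKey a < pvKey b) :=
    pairwise_pvKRows T Bk hTpw rounds 0
  have hndR : (pvKRows T Bk 0 rounds).Nodup :=
    hpw.imp (fun h => ne_of_apply_ne pvKey (ne_of_lt h))
  have hndK : (pvKeyed (fun _ => (0 : Int)) items).Nodup := nodup_pvKeyed items _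
  have hperm : (pvKRows T Bk 0 rounds).Perm (pvKeyed (fun _ => (0 : Int)) items) :=
    (List.perm_ext_iff_of_nodup hndR hndK).2 hmemeq
  rw [PySem.List.sorted_eq_of_perm_of_pairwise_lt _ _ pvKey hperm hpw]
  rw [Nat.sub_zero, ← map_pvKRows T Bk rounds 0, List.map_take]
  congr 1
  simp only [List.length_nil, Nat.cast_zero]
  omega
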